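-- pv_equiv track=rewrite | github.com/Ljaewon-123/Multicampus-boot-camp | pre.py | solution
-- ===== SOURCE A (Python) =====
-- def solution(answers):
--     # 가장 많은 문제를 맞힌 사람을 나타내는 리스트
--     answer = []
--     # 수포자 1
--     supo_1 = [1, 2, 3, 4, 5]
--     # 수포자 2
--     supo_2 = [2, 1, 2, 3, 2, 4, 2, 5]
--     # 수포자 3
--     supo_3 = [3, 3, 1, 1, 2, 2, 4, 4, 5, 5]
--
--     # 각 수포자가 맞은 수를 기록하는 배열
--     cnt = [0, 0, 0]
--
--     # 입력받은 답안을 토대로 각 수포자가 얼마나 맞았는지 탐색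
--     for i in range(len(answers)):
--         # 수포자 1은 5를 주기로 반복
--         if answers[i] == supo_1[i % 5]:  # 왜 반복하는지 알았음
--             cnt[0] += 1
--         # 수포자 2는 8을 주기로 반복
--         if answers[i] == supo_2[i % 8]:
--             cnt[1] += 1
--         # 수포자 3은 10을 주기로 반복
--         if answers[i] == supo_3[i % 10]:
--             cnt[2] += 1
--
--     # 가장 많이 맞춘 수
--     max_cnt = max(cnt)
--
--     # 가장 많이 맞춘 사람을 배열에 담기
--     for i in range(3):
--         # 가장 많이 맞춘 수와 같은 cnt 요소의 인덱스를 +1 하여 answer에 담기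
--         if max_cnt == cnt[i]:
--             answer.append(i + 1)
--
--     return answer
--
-- cnt = [0,1,1]
--
-- max_cnt = 1
-- ===== SOURCE B (Python) =====
-- def solution(answers):
--     # Index the answers once by (position mod 40, value) -- 40 = lcm of the three
--     # pattern periods -- then score each pattern from the index without rescanning.
--     PERIOD = 40
--     freq = {}
--     for i, a in enumerate(answers):
--         key = (i % PERIOD, a)
--         freq[key] = freq.get(key, 0) + 1
--     patterns = [
--         [1, 2, 3, 4, 5],
--         [2, 1, 2, 3, 2, 4, 2, 5],
--         [3, 3, 1, 1, 2, 2, 4, 4, 5, 5],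
--     ]
--     cnt = [sum(freq.get((s, p[s % len(p)]), 0) for s in range(PERIOD)) for p in patterns]
--     best = max(cnt)
--     return [k + 1 for k in range(3) if cnt[k] == best]
-- ===== Notes on version B (the rewrite author's own statement) =====
-- stated objective: alternative
-- what changed: A scans the answers once, comparing each answer against three pattern arrays via i%5/i%8/i%10 inside one interleaved loop; B never compares answers with patterns during the scan: it builds a hash index (dict) counting occurrences of each (position mod 40, value) pair (40 = lcm of the periods), then scores each pattern purely from that index by summing 40 dictionary lookups.
import Mathlib
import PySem

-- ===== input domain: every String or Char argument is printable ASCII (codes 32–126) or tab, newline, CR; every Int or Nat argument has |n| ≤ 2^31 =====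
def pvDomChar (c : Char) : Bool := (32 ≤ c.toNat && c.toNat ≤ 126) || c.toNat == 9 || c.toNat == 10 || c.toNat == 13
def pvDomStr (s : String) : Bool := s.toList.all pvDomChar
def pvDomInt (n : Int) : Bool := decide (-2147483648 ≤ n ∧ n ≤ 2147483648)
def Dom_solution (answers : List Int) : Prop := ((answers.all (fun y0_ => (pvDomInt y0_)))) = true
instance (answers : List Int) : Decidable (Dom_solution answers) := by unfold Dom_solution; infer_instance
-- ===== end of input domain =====

-- B replaces A's interleaved compare-against-three-patterns loop by a dict indexing the answers
-- by (position mod 40, value) and scores each pattern from that index; objective: alternative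
-- algorithm, same outputs.

-- ===== PORT A =====
def solution (answers : List Int) : List Int :=
  let supo1 : List Int := [1, 2, 3, 4, 5]
  let supo2 : List Int := [2, 1, 2, 3, 2, 4, 2, 5]
  let supo3 : List Int := [3, 3, 1, 1, 2, 2, 4, 4, 5, 5]
  let cnt :=
    (PySem.List.pyRange 0 (answers.length : Int) 1).foldl
      (fun (c : Int × Int × Int) i =>
        let c := if PySem.List.pyGetD answers i 0 = PySem.List.pyGetD supo1 (PySem.Int.mod i 5) 0 then (c.1 + 1, c.2.1, c.2.2) else c
        let c := if PySem.List.pyGetD answers i 0 = PySem.List.pyGetD supo2 (PySem.Int.mod i 8) 0 then (c.1, c.2.1 + 1, c.2.2) else c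
        let c := if PySem.List.pyGetD answers i 0 = PySem.List.pyGetD supo3 (PySem.Int.mod i 10) 0 then (c.1, c.2.1, c.2.2 + 1) else c
        c)
      (0, 0, 0)
  let cntList : List Int := [cnt.1, cnt.2.1, cnt.2.2]
  let maxCnt := (PySem.List.max? cntList (fun x => x)).getD 0
  (PySem.List.pyRange 0 3 1).foldl
    (fun answer i => if maxCnt = PySem.List.pyGetD cntList i 0 then answer ++ [i + 1] else answer)
    []

-- ===== PORT B =====
-- the dict-building loop of Source B: freq[(i % 40, a)] = freq.get((i % 40, a), 0) + 1
def bFreq (answers : List Int) : PySem.Dict (Int × Int) Int :=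
  (PySem.List.enumerate answers 0).foldl
    (fun d ia =>
      let key := (PySem.Int.mod ia.1 40, ia.2)
      d.insert key (d.getD key 0 + 1))
    PySem.Dict.empty

def solution_alt (answers : List Int) : List Int :=
  let freq := bFreq answers
  let patterns : List (List Int) := [[1, 2, 3, 4, 5], [2, 1, 2, 3, 2, 4, 2, 5], [3, 3, 1, 1, 2, 2, 4, 4, 5, 5]]
  let cnt := patterns.map (fun p =>
    ((PySem.List.pyRange 0 40 1).map
      (fun s => freq.getD (s, PySem.List.pyGetD p (PySem.Int.mod s (p.length : Int)) 0) 0)).sum)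
  let best := (PySem.List.max? cnt (fun x => x)).getD 0
  (PySem.List.pyRange 0 3 1).filterMap (fun k =>
    if PySem.List.pyGetD cnt k 0 = best then some (k + 1) else none)

-- ===== PRECONDITION & SPEC =====
def Spec_solution (answers : List Int) (out : List Int) : Prop := out = solution_alt answers
instance (answers : List Int) (out : List Int) : Decidable (Spec_solution answers out) := by unfold Spec_solution; infer_instance

-- ===== CLAIM (what is proved, stated in full; the proofs are below) =====
def Claim_equal_solution : Prop := ∀ (answers : List Int), Dom_solution answers → Spec_solution answers (solution answers)

-- ===== LEMMAS AND PROOFS =====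

-- one indicator survives: summing the hit-indicator over all 40 slots picks out slot x.1
theorem sum_ind_single (g : Nat → Int) (x : Nat × Int) :
    ∀ N, x.1 < N →
      ((List.range N).map (fun s => if (((s : Nat) : Int), g s) = ((x.1 : Int), x.2) then (1 : Int) else 0)).sum
      = if x.2 = g x.1 then 1 else 0 := by
  intro N
  induction N with
  | zero => intro h; omega
  | succ N ih =>
      intro h
      rw [List.range_succ, List.map_append, List.sum_append]
      by_cases hx : x.1 < N
      · rw [ih hx]
        have hne : (((N : Nat) : Int), g N) ≠ ((x.1 : Int), x.2) := by
          intro hc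
          have : (N : Int) = (x.1 : Int) := congrArg Prod.fst hc
          omega
        simp only [List.map_cons, List.map_nil, List.sum_cons, List.sum_nil]
        rw [if_neg hne]
        ring
      · have hxN : x.1 = N := by omega
        have hzero : ((List.range N).map (fun s => if (((s : Nat) : Int), g s) = ((x.1 : Int), x.2) then (1 : Int) else 0)).sum = 0 := by
          apply List.sum_eq_zero
          intro y hy
          rcases List.mem_map.mp hy with ⟨s, hs, rfl⟩
          have hsN : s < N := List.mem_range.mp hs
          have : (((s : Nat) : Int), g s) ≠ ((x.1 : Int), x.2) := by
            intro hc
            have : (s : Int) = (x.1 : Int) := congrArg Prod.fst hc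
            omega
          simp [this]
        rw [hzero]
        subst hxN
        simp [Prod.ext_iff, eq_comm]

-- summing per-slot counts of the hash index equals summing the hit indicator over the data
theorem sum_count_eq (g : Nat → Int) :
    ∀ (P : List (Nat × Int)), (∀ x ∈ P, x.1 < 40) →
      ((List.range 40).map (fun s =>
          (((P.map (fun x => ((x.1 : Int), x.2))).count (((s : Nat) : Int), g s) : Nat) : Int))).sum
      = (P.map (fun x => if x.2 = g x.1 then (1 : Int) else 0)).sum := by
  intro P
  induction P with
  | nil => intro _; simp
  | cons x P ih =>
      intro hb
      have hx : x.1 < 40 := hb x (by simp)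
      have hP : ∀ y ∈ P, y.1 < 40 := fun y hy => hb y (by simp [hy])
      simp only [List.map_cons, List.count_cons, List.sum_cons]
      have hsplit :
          ((List.range 40).map (fun s =>
            (((P.map (fun x => ((x.1 : Int), x.2))).count (((s : Nat) : Int), g s)
              + if (((x.1 : Int), x.2) == (((s : Nat) : Int), g s)) then 1 else 0 : Nat) : Int))).sum
          = ((List.range 40).map (fun s =>
              (((P.map (fun x => ((x.1 : Int), x.2))).count (((s : Nat) : Int), g s) : Nat) : Int))).sum
            + ((List.range 40).map (fun s =>
                if (((s : Nat) : Int), g s) = ((x.1 : Int), x.2) then (1 : Int) else 0)).sum := by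
        have hpt : ∀ s : Nat,
            (((P.map (fun x => ((x.1 : Int), x.2))).count (((s : Nat) : Int), g s)
              + if (((x.1 : Int), x.2) == (((s : Nat) : Int), g s)) then 1 else 0 : Nat) : Int)
            = (((P.map (fun x => ((x.1 : Int), x.2))).count (((s : Nat) : Int), g s) : Nat) : Int)
              + (if (((s : Nat) : Int), g s) = ((x.1 : Int), x.2) then (1 : Int) else 0) := by
          intro s
          by_cases h : (((s : Nat) : Int), g s) = ((x.1 : Int), x.2)
          · rw [if_pos h, if_pos (beq_iff_eq.mpr h.symm)]; push_cast; ring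
          · rw [if_neg h, if_neg (by
                simp only [beq_iff_eq]
                exact fun hc => h hc.symm)]
            push_cast; ring
        calc ((List.range 40).map (fun s =>
                (((P.map (fun x => ((x.1 : Int), x.2))).count (((s : Nat) : Int), g s)
                  + if (((x.1 : Int), x.2) == (((s : Nat) : Int), g s)) then 1 else 0 : Nat) : Int))).sum
            = ((List.range 40).map (fun s =>
                (((P.map (fun x => ((x.1 : Int), x.2))).count (((s : Nat) : Int), g s) : Nat) : Int)
                + (if (((s : Nat) : Int), g s) = ((x.1 : Int), x.2) then (1 : Int) else 0))).sum := by
              exact congrArg _ (List.map_congr_left (fun s _ => hpt s))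
          _ = _ := by rw [← List.sum_map_add]
      rw [hsplit, ih hP, sum_ind_single g x 40 hx]
      ring

-- the indexed data: the dict built by bFreq is a counter of the (i % 40, a) pairs
theorem bFreq_getD (answers : List Int) (v : Int × Int) :
    (bFreq answers).getD v 0
      = (((PySem.List.enumerate answers 0).map
            (fun ia => (PySem.Int.mod ia.1 40, ia.2))).count v : Int) := by
  unfold bFreq
  rw [show (fun (d : PySem.Dict (Int × Int) Int) (ia : Int × Int) =>
        let key := (PySem.Int.mod ia.1 40, ia.2)
        d.insert key (d.getD key 0 + 1))
      = (fun d ia => d.insert (PySem.Int.mod ia.1 40, ia.2)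
          (d.getD (PySem.Int.mod ia.1 40, ia.2) 0 + 1)) from rfl]
  rw [← List.foldl_map (f := fun ia : Int × Int => (PySem.Int.mod ia.1 40, ia.2))
        (g := fun (d : PySem.Dict (Int × Int) Int) x => d.insert x (d.getD x 0 + 1))]
  rw [PySem.Dict.getD_foldl_insert_add_one]
  simp [PySem.Dict.getD_empty]

-- the key list in index form
theorem bFreq_keys (answers : List Int) :
    (PySem.List.enumerate answers 0).map (fun ia => (PySem.Int.mod ia.1 40, ia.2))
      = ((List.range answers.length).map (fun k => ((k % 40 : Nat), answers.getD k 0))).map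
          (fun x => ((x.1 : Int), x.2)) := by
  rw [PySem.List.enumerate_eq_map_pyRange answers 0, PySem.List.pyRange_one]
  simp only [List.map_map, Int.sub_zero, PySem.List.len_eq, Int.toNat_natCast]
  apply List.map_congr_left
  intro k hk
  simp only [Function.comp, Int.zero_add]
  have em : PySem.Int.mod (k : Int) 40 = ((k % 40 : Nat) : Int) := by
    exact_mod_cast PySem.Int.mod_natCast k 40
  rw [em, PySem.List.pyGetD_natCast]

-- B's score of one pattern equals the per-index hit count A accumulates
theorem bscore_eq (answers p : List Int) (hdvd : p.length ∣ 40) :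
    ((PySem.List.pyRange 0 40 1).map
        (fun s => (bFreq answers).getD (s, PySem.List.pyGetD p (PySem.Int.mod s (p.length : Int)) 0) 0)).sum
    = ((List.range answers.length).map
        (fun k => if answers.getD k 0 = p.getD (k % p.length) 0 then (1 : Int) else 0)).sum := by
  rw [PySem.List.pyRange_one]
  have h40 : ((40 : Int) - 0).toNat = 40 := by decide
  simp only [h40, List.map_map]
  have hmap : ∀ s : Nat,
      (bFreq answers).getD ((0 : Int) + (s : Int),
          PySem.List.pyGetD p (PySem.Int.mod ((0 : Int) + (s : Int)) (p.length : Int)) 0) 0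
      = ((((List.range answers.length).map (fun k => ((k % 40 : Nat), answers.getD k 0))).map
            (fun x => ((x.1 : Int), x.2))).count (((s : Nat) : Int), p.getD (s % p.length) 0) : Int) := by
    intro s
    have em : PySem.Int.mod ((0 : Int) + (s : Int)) (p.length : Int) = ((s % p.length : Nat) : Int) := by
      rw [Int.zero_add]; exact_mod_cast PySem.Int.mod_natCast s p.length
    rw [bFreq_getD, bFreq_keys, em, PySem.List.pyGetD_natCast, Int.zero_add]
  calc ((List.range 40).map (fun s =>
          ((fun s => (bFreq answers).getD (s, PySem.List.pyGetD p (PySem.Int.mod s (p.length : Int)) 0) 0) ∘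
            (fun k : Nat => (0 : Int) + (k : Int))) s)).sum
      = ((List.range 40).map (fun s =>
          ((((List.range answers.length).map (fun k => ((k % 40 : Nat), answers.getD k 0))).map
              (fun x => ((x.1 : Int), x.2))).count (((s : Nat) : Int), (fun t => p.getD (t % p.length) 0) s) : Int))).sum := by
        apply congrArg
        apply List.map_congr_left
        intro s _
        exact hmap s
    _ = (((List.range answers.length).map (fun k => ((k % 40 : Nat), answers.getD k 0))).map
          (fun x => if x.2 = (fun t => p.getD (t % p.length) 0) x.1 then (1 : Int) else 0)).sum := by
        apply sum_count_eq
        intro x hx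
        rcases List.mem_map.mp hx with ⟨k, _, rfl⟩
        exact Nat.mod_lt k (by norm_num)
    _ = ((List.range answers.length).map
          (fun k => if answers.getD k 0 = p.getD (k % p.length) 0 then (1 : Int) else 0)).sum := by
        rw [List.map_map]
        apply congrArg
        apply List.map_congr_left
        intro k _
        simp only [Function.comp]
        simp [Nat.mod_mod_of_dvd k hdvd]

theorem pyrange3 : PySem.List.pyRange 0 3 1 = [0, 1, 2] := by decide

theorem tail_eq (s1 s2 s3 : Int) :
    (PySem.List.pyRange 0 3 1).foldl
      (fun answer i => if (PySem.List.max? [s1, s2, s3] (fun x => x)).getD 0 = PySem.List.pyGetD [s1, s2, s3] i 0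
        then answer ++ [i + 1] else answer) []
    = (PySem.List.pyRange 0 3 1).filterMap
        (fun k => if PySem.List.pyGetD [s1, s2, s3] k 0 = (PySem.List.max? [s1, s2, s3] (fun x => x)).getD 0
          then some (k + 1) else none) := by
  set m := (PySem.List.max? [s1, s2, s3] (fun x => x)).getD 0 with hm
  rw [pyrange3]
  simp only [List.foldl, List.filterMap]
  by_cases h1 : s1 = m <;> by_cases h2 : s2 = m <;> by_cases h3 : s3 = m <;>
    simp [h1, h2, h3, eq_comm, PySem.List.pyGetD]

-- ===== VERDICT (by name: the statement is the Claim_ definition above) =====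
theorem solution_spec : Claim_equal_solution := by
  intro answers _
  show solution answers = solution_alt answers
  unfold solution solution_alt
  rw [PySem.List.pyRange_one]
  simp only [Int.sub_zero, Int.toNat_natCast, Int.zero_add]
  rw [List.foldl_map]
  have hstep : (fun (c : Int × Int × Int) (k : Nat) =>
      let c := if PySem.List.pyGetD answers (k : Int) 0 = PySem.List.pyGetD [1, 2, 3, 4, 5] (PySem.Int.mod (k : Int) 5) 0 then (c.1 + 1, c.2.1, c.2.2) else c
      let c := if PySem.List.pyGetD answers (k : Int) 0 = PySem.List.pyGetD [2, 1, 2, 3, 2, 4, 2, 5] (PySem.Int.mod (k : Int) 8) 0 then (c.1, c.2.1 + 1, c.2.2) else c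
      let c := if PySem.List.pyGetD answers (k : Int) 0 = PySem.List.pyGetD [3, 3, 1, 1, 2, 2, 4, 4, 5, 5] (PySem.Int.mod (k : Int) 10) 0 then (c.1, c.2.1, c.2.2 + 1) else c
      c)
      = fun c k =>
        (c.1 + (if answers.getD k 0 = ([1, 2, 3, 4, 5] : List Int).getD (k % 5) 0 then 1 else 0),
         c.2.1 + (if answers.getD k 0 = ([2, 1, 2, 3, 2, 4, 2, 5] : List Int).getD (k % 8) 0 then 1 else 0),
         c.2.2 + (if answers.getD k 0 = ([3, 3, 1, 1, 2, 2, 4, 4, 5, 5] : List Int).getD (k % 10) 0 then 1 else 0)) := by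
    funext c k
    have em5 : PySem.Int.mod (k : Int) 5 = ((k % 5 : Nat) : Int) := by
      exact_mod_cast PySem.Int.mod_natCast k 5
    have em8 : PySem.Int.mod (k : Int) 8 = ((k % 8 : Nat) : Int) := by
      exact_mod_cast PySem.Int.mod_natCast k 8
    have em10 : PySem.Int.mod (k : Int) 10 = ((k % 10 : Nat) : Int) := by
      exact_mod_cast PySem.Int.mod_natCast k 10
    simp only [em5, em8, em10, PySem.List.pyGetD_natCast]
    split_ifs <;> simp
  rw [hstep]
  rw [PySem.List.foldl_prod_mk
      (f := fun (s : Int) (k : Nat) => s + if answers.getD k 0 = ([1, 2, 3, 4, 5] : List Int).getD (k % 5) 0 then 1 else 0)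
      (g := fun (t : Int × Int) (k : Nat) =>
        (t.1 + (if answers.getD k 0 = ([2, 1, 2, 3, 2, 4, 2, 5] : List Int).getD (k % 8) 0 then 1 else 0),
         t.2 + (if answers.getD k 0 = ([3, 3, 1, 1, 2, 2, 4, 4, 5, 5] : List Int).getD (k % 10) 0 then 1 else 0)))]
  rw [PySem.List.foldl_prod_mk
      (f := fun (s : Int) (k : Nat) => s + if answers.getD k 0 = ([2, 1, 2, 3, 2, 4, 2, 5] : List Int).getD (k % 8) 0 then 1 else 0)
      (g := fun (s : Int) (k : Nat) => s + if answers.getD k 0 = ([3, 3, 1, 1, 2, 2, 4, 4, 5, 5] : List Int).getD (k % 10) 0 then 1 else 0)]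
  rw [PySem.List.foldl_add, PySem.List.foldl_add, PySem.List.foldl_add]
  have b1 := bscore_eq answers [1, 2, 3, 4, 5] (by norm_num)
  have b2 := bscore_eq answers [2, 1, 2, 3, 2, 4, 2, 5] (by norm_num)
  have b3 := bscore_eq answers [3, 3, 1, 1, 2, 2, 4, 4, 5, 5] (by norm_num)
  simp only [List.map_cons, List.map_nil, zero_add]
  simp only [b1, b2, b3]
  exact tail_eq _ _ _
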